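-- pv_equiv track=rewrite | github.com/scj39/flowlogschallenge | processflows.py | get_tag_count
-- ===== SOURCE A (Python) =====
-- from collections import defaultdict
--
-- def get_tag_count(
--     protocolportcount: defaultdict, tag2protocolport: defaultdict
-- ) -> defaultdict:
--     """
--     Returns a defaultdict with the counts associated with each tag
--     """
--     totalentries = sum(protocolportcount.values())
--     tagged_entries = 0
--     tag2count: defaultdict = defaultdict(int)
--     for tag, array in tag2protocolport.items():
--         for protocolport in array:
--             if occurences := protocolportcount.get(protocolport, 0):
--                 tag2count[tag] += occurences
--                 tagged_entries += occurences
--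
--     if untagged_count := totalentries - tagged_entries:
--         tag2count["untagged"] = untagged_count
--
--     # everything we see that doesn't have an entry in the lookup table
--     # is labeled untagged.
--     return tag2count
-- ===== SOURCE B (Python) =====
-- from collections import defaultdict
--
-- def get_tag_count(
--     protocolportcount: defaultdict, tag2protocolport: defaultdict
-- ) -> defaultdict:
--     """
--     Returns a defaultdict with the counts associated with each tag
--     """
--     def tag_sum(array):
--         return sum(protocolportcount.get(p, 0) for p in array)
--
--     pairs = [
--         (tag, tag_sum(array))
--         for tag, array in tag2protocolport.items()
--         if any(protocolportcount.get(p, 0) for p in array)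
--     ]
--     untagged = sum(protocolportcount.values()) - sum(
--         tag_sum(array) for array in tag2protocolport.values()
--     )
--     if untagged:
--         pairs.append(("untagged", untagged))
--     return defaultdict(int, pairs)
-- ===== Notes on version B (the rewrite author's own statement) =====
-- stated objective: alternative
-- what changed: Replaces A's mutating defaultdict with walrus-guarded incremental accumulation by a pure comprehension that builds each (tag, sum-of-counts) pair directly, computing the untagged remainder from two totals instead of a running tagged_entries counter; it trades a second summing pass over the tag table for side-effect-free construction.
import Mathlib
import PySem

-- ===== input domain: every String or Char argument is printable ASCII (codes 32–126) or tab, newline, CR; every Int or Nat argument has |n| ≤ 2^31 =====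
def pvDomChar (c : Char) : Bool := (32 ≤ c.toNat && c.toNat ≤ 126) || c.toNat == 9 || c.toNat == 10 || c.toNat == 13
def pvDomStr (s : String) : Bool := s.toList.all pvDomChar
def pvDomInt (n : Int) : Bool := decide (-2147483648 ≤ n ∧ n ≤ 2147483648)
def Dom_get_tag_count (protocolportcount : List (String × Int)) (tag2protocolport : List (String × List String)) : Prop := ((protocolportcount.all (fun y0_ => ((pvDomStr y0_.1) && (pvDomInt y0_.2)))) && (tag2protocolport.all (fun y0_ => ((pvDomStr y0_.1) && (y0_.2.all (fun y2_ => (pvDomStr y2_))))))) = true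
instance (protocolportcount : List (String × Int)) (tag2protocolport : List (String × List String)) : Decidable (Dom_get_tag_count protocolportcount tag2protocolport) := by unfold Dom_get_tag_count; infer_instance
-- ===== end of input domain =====

-- B replaces A's mutating defaultdict/walrus accumulation by a pure comprehension building the
-- (tag, sum) pairs directly, with the untagged remainder computed from two totals (objective: alternative; same asymptotic cost).

-- ===== PORT A =====
-- protocolportcount.get(protocolport, 0) (first-match dict lookup)
def pvGet (protocolportcount : List (String × Int)) (p : String) : Int :=
  (PySem.Dict.mk protocolportcount).getD p 0

-- one iteration of A's outer loop: the inner 'for protocolport in array' loop over the state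
def pvStepA (protocolportcount : List (String × Int)) (st : PySem.Dict String Int × Int)
    (tp : String × List String) : PySem.Dict String Int × Int :=
  tp.2.foldl (fun st p =>
    let occurences := pvGet protocolportcount p
    if occurences ≠ 0 then (st.1.insert tp.1 (st.1.getD tp.1 0 + occurences), st.2 + occurences)
    else st) st

def get_tag_count (protocolportcount : List (String × Int)) (tag2protocolport : List (String × List String)) : List (String × Int) :=
  let totalentries := (protocolportcount.map Prod.snd).sum
  let st := tag2protocolport.foldl (pvStepA protocolportcount) (PySem.Dict.empty, 0)
  let untagged_count := totalentries - st.2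
  (if untagged_count ≠ 0 then st.1.insert "untagged" untagged_count else st.1).items

-- ===== PORT B =====
-- Source B's tag_sum helper
def pvTagSum (protocolportcount : List (String × Int)) (array : List String) : Int :=
  (array.map (fun p => pvGet protocolportcount p)).sum

def get_tag_count_alt (protocolportcount : List (String × Int)) (tag2protocolport : List (String × List String)) : List (String × Int) :=
  let pairs := (tag2protocolport.filter (fun tp => tp.2.any (fun p => pvGet protocolportcount p != 0))).map
      (fun tp => (tp.1, pvTagSum protocolportcount tp.2))
  let untagged := (protocolportcount.map Prod.snd).sum
      - (tag2protocolport.map (fun tp => pvTagSum protocolportcount tp.2)).sum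
  let pairs := if untagged ≠ 0 then pairs ++ [("untagged", untagged)] else pairs
  (PySem.Dict.ofList pairs).items

-- ===== PRECONDITION & SPEC =====
-- Pre_ only says that tag2protocolport really is a dict (distinct keys), which every Python input
-- satisfies; on assoc lists with a repeated tag the two ports would combine the duplicates differently.
def Pre_get_tag_count (protocolportcount : List (String × Int)) (tag2protocolport : List (String × List String)) : Prop :=
  (tag2protocolport.map Prod.fst).Nodup
instance (protocolportcount : List (String × Int)) (tag2protocolport : List (String × List String)) : Decidable (Pre_get_tag_count protocolportcount tag2protocolport) := by unfold Pre_get_tag_count; infer_instance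

def pvWitness_get_tag_count : (List (String × Int)) × (List (String × List String)) :=
  ([("tcp_80", 2), ("udp_53", 1)], [("web", ["tcp_80"]), ("dns", ["udp_53", "tcp_80"])])

def Spec_get_tag_count (protocolportcount : List (String × Int)) (tag2protocolport : List (String × List String)) (out : List (String × Int)) : Prop := out = get_tag_count_alt protocolportcount tag2protocolport
instance (protocolportcount : List (String × Int)) (tag2protocolport : List (String × List String)) (out : List (String × Int)) : Decidable (Spec_get_tag_count protocolportcount tag2protocolport out) := by unfold Spec_get_tag_count; infer_instance

-- ===== CLAIM (what is proved, stated in full; the proofs are below) =====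
def Claim_equal_get_tag_count : Prop := ∀ (protocolportcount : List (String × Int)) (tag2protocolport : List (String × List String)), Dom_get_tag_count protocolportcount tag2protocolport → Pre_get_tag_count protocolportcount tag2protocolport → Spec_get_tag_count protocolportcount tag2protocolport (get_tag_count protocolportcount tag2protocolport)

-- ===== LEMMAS AND PROOFS =====

-- if no element of array has a nonzero count, the tag's sum is 0
lemma pvTagSum_eq_zero (ppc : List (String × Int)) (arr : List String)
    (h : arr.any (fun p => pvGet ppc p != 0) = false) : pvTagSum ppc arr = 0 := by
  apply List.sum_eq_zero
  intro x hx
  simp only [pvTagSum, List.mem_map] at hx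
  obtain ⟨p, hp, rfl⟩ := hx
  simp only [List.any_eq_false, bne_iff_ne, ne_eq, not_not] at h
  exact h p hp

lemma pvTagSum_cons (ppc : List (String × Int)) (p : String) (ps : List String) :
    pvTagSum ppc (p :: ps) = pvGet ppc p + pvTagSum ppc ps := by
  simp [pvTagSum]

-- A's inner loop computed in closed form: it adds pvTagSum to the running total and inserts the
-- tag (accumulating into it) exactly when some element has a nonzero count
lemma pvStepA_eq (ppc : List (String × Int)) (tag : String) (arr : List String)
    (d : PySem.Dict String Int) (t : Int) :
    pvStepA ppc (d, t) (tag, arr)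
      = ((if arr.any (fun p => pvGet ppc p != 0) then d.insert tag (d.getD tag 0 + pvTagSum ppc arr) else d),
         t + pvTagSum ppc arr) := by
  induction arr generalizing d t with
  | nil => simp [pvStepA, pvTagSum]
  | cons p ps ih =>
    simp only [pvStepA] at ih ⊢
    simp only [List.foldl_cons]
    by_cases h : pvGet ppc p = 0
    · rw [if_neg (by simp [h]), ih]
      simp [pvTagSum_cons, h]
    · rw [if_pos h, ih]
      by_cases hany : ps.any (fun p => pvGet ppc p != 0)
      · simp [hany, PySem.Dict.insert_insert_self, PySem.Dict.getD_insert_self,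
          pvTagSum_cons, h, add_assoc]
      · simp only [Bool.not_eq_true] at hany
        simp [hany, pvTagSum_cons, pvTagSum_eq_zero ppc ps hany, h, add_assoc]

-- A's outer loop in closed form: starting from a dict none of whose keys is a coming tag, it
-- appends exactly B's (tag, sum) pairs and adds the grand total of the tag sums
lemma pvLoopA_eq (ppc : List (String × Int)) (t2p : List (String × List String))
    (d : PySem.Dict String Int) (t : Int)
    (hnd : (t2p.map Prod.fst).Nodup)
    (hfresh : ∀ tp ∈ t2p, d.contains tp.1 = false) :
    t2p.foldl (pvStepA ppc) (d, t)
      = (PySem.Dict.mk (d.items ++ ((t2p.filter (fun tp => tp.2.any (fun p => pvGet ppc p != 0))).map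
            (fun tp => (tp.1, pvTagSum ppc tp.2)))),
         t + (t2p.map (fun tp => pvTagSum ppc tp.2)).sum) := by
  induction t2p generalizing d t with
  | nil =>
    simp
  | cons tp rest ih =>
    obtain ⟨tag, arr⟩ := tp
    simp only [List.map_cons, List.nodup_cons] at hnd
    have hfr0 : d.contains tag = false := hfresh (tag, arr) (List.mem_cons_self ..)
    simp only [List.foldl_cons, pvStepA_eq]
    by_cases hany : arr.any (fun p => pvGet ppc p != 0)
    · simp only [hany, if_true, PySem.Dict.getD_of_not_contains d 0 hfr0, zero_add]
      rw [ih _ _ hnd.2]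
      · simp only [PySem.Dict.items_insert_of_not_contains d _ hfr0]
        simp only [List.filter_cons, hany, if_true, List.map_cons, List.sum_cons, Prod.mk.injEq]
        refine ⟨by simp [List.append_assoc], by ring⟩
      · intro tp' htp'
        rw [PySem.Dict.contains_insert]
        have : tp'.1 ≠ tag := by
          intro hcontr
          exact hnd.1 (hcontr ▸ List.mem_map_of_mem htp')
        simp [this, hfresh tp' (List.mem_cons_of_mem _ htp')]
    · simp only [Bool.not_eq_true] at hany
      simp only [hany, Bool.false_eq_true, if_false]
      rw [ih _ _ hnd.2 (fun tp' htp' => hfresh tp' (List.mem_cons_of_mem _ htp'))]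
      simp only [List.filter_cons, hany, Bool.false_eq_true, if_false, List.map_cons,
        List.sum_cons, Prod.mk.injEq]
      exact ⟨trivial, by ring⟩

-- building a dict from pairs with distinct keys keeps exactly that list
lemma pvOfList_items (l : List (String × Int)) (h : (l.map Prod.fst).Nodup) :
    (PySem.Dict.ofList l).items = l := by
  have := PySem.Dict.items_foldl_insert_fresh l Prod.fst Prod.snd PySem.Dict.empty
    (fun a _ => PySem.Dict.contains_empty a.1) h
  simpa [PySem.Dict.ofList, PySem.Dict.update] using this

lemma pvPairs_keys_nodup (ppc : List (String × Int)) (t2p : List (String × List String))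
    (hnd : (t2p.map Prod.fst).Nodup) :
    (((t2p.filter (fun tp => tp.2.any (fun p => pvGet ppc p != 0))).map
        (fun tp => (tp.1, pvTagSum ppc tp.2))).map Prod.fst).Nodup := by
  have : ((t2p.filter (fun tp => tp.2.any (fun p => pvGet ppc p != 0))).map
      (fun tp => (tp.1, pvTagSum ppc tp.2))).map Prod.fst
      = (t2p.filter (fun tp => tp.2.any (fun p => pvGet ppc p != 0))).map Prod.fst := by
    simp
  rw [this]
  exact hnd.sublist (List.Sublist.map _ List.filter_sublist)

-- ===== VERDICT (by name: the statement is the Claim_ definition above) =====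
theorem get_tag_count_spec : Claim_equal_get_tag_count := by
  intro ppc t2p _ hpre
  unfold Spec_get_tag_count get_tag_count get_tag_count_alt
  rw [pvLoopA_eq ppc t2p PySem.Dict.empty 0 hpre (fun tp _ => PySem.Dict.contains_empty tp.1)]
  set pairs := (t2p.filter (fun tp => tp.2.any (fun p => pvGet ppc p != 0))).map
      (fun tp => (tp.1, pvTagSum ppc tp.2)) with hpairs
  have hnodup := pvPairs_keys_nodup ppc t2p hpre
  simp only [zero_add, PySem.Dict.empty, List.nil_append]
  by_cases hu : (ppc.map Prod.snd).sum - (t2p.map (fun tp => pvTagSum ppc tp.2)).sum = 0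
  · simp only [hu, ne_eq, not_true_eq_false, if_false, ← hpairs]
    rw [pvOfList_items pairs hnodup]
  · simp only [ne_eq, hu, not_false_eq_true, if_true, ← hpairs]
    have : PySem.Dict.ofList (pairs ++ [("untagged", (ppc.map Prod.snd).sum - (t2p.map (fun tp => pvTagSum ppc tp.2)).sum)])
        = (PySem.Dict.ofList pairs).insert "untagged" ((ppc.map Prod.snd).sum - (t2p.map (fun tp => pvTagSum ppc tp.2)).sum) := by
      simp [PySem.Dict.ofList, PySem.Dict.update, List.foldl_append]
    rw [this]
    have hmk : PySem.Dict.ofList pairs = PySem.Dict.mk pairs :=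
      PySem.Dict.ext (pvOfList_items pairs hnodup)
    rw [hmk]
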